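-- pv_equiv track=rewrite | github.com/kaushleshchandel/DFWriter | writer/checker.py | check_grammar
-- ===== SOURCE A (Python) =====
-- def check_grammar(sentence):
--     # Very basic grammar rules
--     words = sentence.split()
--     corrections = []
--     for i, word in enumerate(words):
--         # Check for repeated words
--         if i > 0 and word.lower() == words[i-1].lower():
--             corrections.append((i, f"Repeated word: {word}"))
--         # Check for "a" vs "an"
--         if word.lower() == 'a' and i < len(words) - 1:
--             if words[i+1][0].lower() in 'aeiou':
--                 corrections.append((i, f"'a' should be 'an' before '{words[i+1]}'"))
--     return corrections
-- ===== SOURCE B (Python) =====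
-- def check_grammar(sentence):
--     # Two independent passes (repeated words, then a/an), merged by index;
--     # repeated-word correction first when both fire at the same index.
--     words = sentence.split()
--     n = len(words)
--     repeats = []
--     for i in range(1, n):
--         if words[i].lower() == words[i - 1].lower():
--             repeats.append((i, f"Repeated word: {words[i]}"))
--     articles = []
--     for i in range(0, n - 1):
--         if words[i].lower() == 'a' and words[i + 1][0].lower() in 'aeiou':
--             articles.append((i, f"'a' should be 'an' before '{words[i + 1]}'"))
--     out = []
--     ri, ai = 0, 0
--     while ri < len(repeats) and ai < len(articles):
--         if repeats[ri][0] <= articles[ai][0]: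
--             out.append(repeats[ri])
--             ri += 1
--         else:
--             out.append(articles[ai])
--             ai += 1
--     out.extend(repeats[ri:])
--     out.extend(articles[ai:])
--     return out
-- ===== Notes on version B (the rewrite author's own statement) =====
-- stated objective: alternative
-- what changed: Replaced the single interleaved loop by two independent passes (one collecting repeated-word corrections, one collecting a/an corrections) whose index-sorted results are merged, repeated-word first on equal index.
import Mathlib
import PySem

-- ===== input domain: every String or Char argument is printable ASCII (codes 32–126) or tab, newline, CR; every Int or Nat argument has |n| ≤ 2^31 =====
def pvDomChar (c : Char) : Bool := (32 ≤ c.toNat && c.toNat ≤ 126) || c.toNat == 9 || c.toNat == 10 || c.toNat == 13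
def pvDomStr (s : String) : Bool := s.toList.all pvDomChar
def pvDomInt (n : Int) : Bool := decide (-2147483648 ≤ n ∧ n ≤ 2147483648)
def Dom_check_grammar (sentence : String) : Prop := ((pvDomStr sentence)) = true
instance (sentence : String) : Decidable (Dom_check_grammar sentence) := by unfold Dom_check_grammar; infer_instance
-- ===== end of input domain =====

-- B restructures A's single interleaved loop into two independent passes merged by index (alternative decomposition, same cost).

-- ===== PORT A =====
-- words[i+1][0].lower() in 'aeiou' (the indexed word is a split() word, hence nonempty; none = IndexError, unreachable)
def pvFirstVowel (w : String) : Bool :=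
  match PySem.Str.pyGet? w 0 with
  | some c => PySem.Str.isIn (String.ofList [PySem.Chars.lowerChar c]) "aeiou"
  | none => false

def check_grammar (sentence : String) : List (Int × String) :=
  let words := PySem.Str.split₀ sentence
  (PySem.List.enumerate words).foldl
    (fun corrections iw =>
      let corrections :=
        if 0 < iw.1 ∧ PySem.Str.lower iw.2 = PySem.Str.lower (PySem.List.pyGetD words (iw.1 - 1) "") then
          corrections ++ [(iw.1, "Repeated word: " ++ iw.2)]
        else corrections
      if PySem.Str.lower iw.2 = "a" ∧ iw.1 < (words.length : Int) - 1 then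
        if pvFirstVowel (PySem.List.pyGetD words (iw.1 + 1) "") = true then
          corrections ++ [(iw.1, "'a' should be 'an' before '" ++ PySem.List.pyGetD words (iw.1 + 1) "" ++ "'")]
        else corrections
      else corrections) []

-- ===== PORT B =====
def pvMerge : List (Int × String) → List (Int × String) → List (Int × String)
  | [], ys => ys
  | x :: xs, [] => x :: xs
  | x :: xs, y :: ys =>
    if x.1 ≤ y.1 then x :: pvMerge xs (y :: ys) else y :: pvMerge (x :: xs) ys
termination_by xs ys => xs.length + ys.length

def check_grammar_alt (sentence : String) : List (Int × String) :=
  let words := PySem.Str.split₀ sentence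
  let n : Int := words.length
  let repeats := (PySem.List.pyRange 1 n 1).foldl
    (fun acc i =>
      if PySem.Str.lower (PySem.List.pyGetD words i "") = PySem.Str.lower (PySem.List.pyGetD words (i - 1) "") then
        acc ++ [(i, "Repeated word: " ++ PySem.List.pyGetD words i "")]
      else acc) []
  let articles := (PySem.List.pyRange 0 (n - 1) 1).foldl
    (fun acc i =>
      if PySem.Str.lower (PySem.List.pyGetD words i "") = "a" ∧ pvFirstVowel (PySem.List.pyGetD words (i + 1) "") = true then
        acc ++ [(i, "'a' should be 'an' before '" ++ PySem.List.pyGetD words (i + 1) "" ++ "'")]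
      else acc) []
  pvMerge repeats articles

-- ===== PRECONDITION & SPEC =====
def Spec_check_grammar (sentence : String) (out : List (Int × String)) : Prop := out = check_grammar_alt sentence
instance (sentence : String) (out : List (Int × String)) : Decidable (Spec_check_grammar sentence out) := by unfold Spec_check_grammar; infer_instance

-- ===== CLAIM (what is proved, stated in full; the proofs are below) =====
def Claim_equal_check_grammar : Prop := ∀ (sentence : String), Dom_check_grammar sentence → Spec_check_grammar sentence (check_grammar sentence)

-- ===== LEMMAS AND PROOFS =====

-- the single correction (zero or one element) each check contributes at index i
def repAt (ws : List String) (i : Int) : List (Int × String) :=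
  if 0 < i ∧ PySem.Str.lower (PySem.List.pyGetD ws i "") = PySem.Str.lower (PySem.List.pyGetD ws (i - 1) "") then
    [(i, "Repeated word: " ++ PySem.List.pyGetD ws i "")]
  else []

def artAt (ws : List String) (i : Int) : List (Int × String) :=
  if PySem.Str.lower (PySem.List.pyGetD ws i "") = "a" ∧ i < (ws.length : Int) - 1 ∧ pvFirstVowel (PySem.List.pyGetD ws (i + 1) "") = true then
    [(i, "'a' should be 'an' before '" ++ PySem.List.pyGetD ws (i + 1) "" ++ "'")]
  else []

lemma fst_of_mem_repAt {ws : List String} {i : Int} {x : Int × String} (h : x ∈ repAt ws i) : x.1 = i := by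
  unfold repAt at h; split_ifs at h <;> simp_all

lemma fst_of_mem_artAt {ws : List String} {i : Int} {x : Int × String} (h : x ∈ artAt ws i) : x.1 = i := by
  unfold artAt at h; split_ifs at h <;> simp_all

lemma pvMerge_nil_right (xs : List (Int × String)) : pvMerge xs [] = xs := by
  cases xs <;> simp [pvMerge]

lemma pvMerge_cons_left (x : Int × String) (xs ys : List (Int × String))
    (h : ∀ y ∈ ys, x.1 ≤ y.1) : pvMerge (x :: xs) ys = x :: pvMerge xs ys := by
  cases ys with
  | nil => simp [pvMerge_nil_right]
  | cons y ys =>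
    have hxy : x.1 ≤ y.1 := h y (by simp)
    simp [pvMerge, hxy]

lemma pvMerge_cons_right (xs : List (Int × String)) (y : Int × String) (ys : List (Int × String))
    (h : ∀ x ∈ xs, y.1 < x.1) : pvMerge xs (y :: ys) = y :: pvMerge xs ys := by
  cases xs with
  | nil => simp [pvMerge]
  | cons x xs =>
    have hxy : ¬ x.1 ≤ y.1 := by have := h x (by simp); omega
    simp [pvMerge, hxy]

lemma fst_lt_of_mem_flat_rep {ws : List String} {s b : Int} {x : Int × String}
    (h : x ∈ (PySem.List.pyRange s b 1).flatMap (repAt ws)) : s ≤ x.1 := by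
  rcases List.mem_flatMap.mp h with ⟨i, hi, hx⟩
  have := PySem.List.mem_pyRange_one.mp hi
  have := fst_of_mem_repAt hx
  omega

lemma fst_lt_of_mem_flat_art {ws : List String} {s b : Int} {x : Int × String}
    (h : x ∈ (PySem.List.pyRange s b 1).flatMap (artAt ws)) : s ≤ x.1 := by
  rcases List.mem_flatMap.mp h with ⟨i, hi, hx⟩
  have := PySem.List.mem_pyRange_one.mp hi
  have := fst_of_mem_artAt hx
  omega

-- merging the two per-check streams reproduces the per-index interleaving
lemma repAt_cases (ws : List String) (a : Int) : repAt ws a = [] ∨ ∃ s, repAt ws a = [(a, s)] := by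
  unfold repAt; split_ifs
  · exact Or.inr ⟨_, rfl⟩
  · exact Or.inl rfl

lemma artAt_cases (ws : List String) (a : Int) : artAt ws a = [] ∨ ∃ s, artAt ws a = [(a, s)] := by
  unfold artAt; split_ifs
  · exact Or.inr ⟨_, rfl⟩
  · exact Or.inl rfl

lemma merge_flat (ws : List String) (b : Int) : ∀ (k : Nat) (a : Int), (b - a).toNat = k →
    pvMerge ((PySem.List.pyRange a b 1).flatMap (repAt ws)) ((PySem.List.pyRange a b 1).flatMap (artAt ws))
      = (PySem.List.pyRange a b 1).flatMap (fun i => repAt ws i ++ artAt ws i) := by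
  intro k
  induction k with
  | zero =>
    intro a ha
    have : b ≤ a := by omega
    simp [PySem.List.pyRange_one_eq_nil this, pvMerge]
  | succ k ih =>
    intro a ha
    have hab : a < b := by omega
    have ih' := ih (a + 1) (by omega)
    rw [PySem.List.pyRange_one_cons hab]
    simp only [List.flatMap_cons]
    have hrep : ∀ x ∈ (PySem.List.pyRange (a+1) b 1).flatMap (repAt ws), a < x.1 := by
      intro x hx; have := fst_lt_of_mem_flat_rep hx; omega
    have hart : ∀ x ∈ (PySem.List.pyRange (a+1) b 1).flatMap (artAt ws), a < x.1 := by
      intro x hx; have := fst_lt_of_mem_flat_art hx; omega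
    obtain hr | ⟨rs, hr⟩ := repAt_cases ws a <;> obtain ht | ⟨ts, ht⟩ := artAt_cases ws a <;>
      rw [hr, ht] <;> simp only [List.nil_append, List.singleton_append]
    · exact ih'
    · rw [pvMerge_cons_right _ _ _ hrep, ih']
    · rw [pvMerge_cons_left _ _ _ (fun y hy => le_of_lt (hart y hy)), ih']
    · rw [pvMerge_cons_left (a, rs) _ _ (by
        intro y hy
        rcases List.mem_cons.mp hy with h | h
        · simp [h]
        · exact le_of_lt (hart y h)),
        pvMerge_cons_right _ _ _ hrep, ih']
      rfl

-- A's interleaved loop, as a flatMap over the index range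
lemma foldlA (ws : List String) : ∀ (l : List Int) (acc : List (Int × String)),
    l.foldl
      (fun corrections i =>
        let corrections :=
          if 0 < i ∧ PySem.Str.lower (PySem.List.pyGetD ws i "") = PySem.Str.lower (PySem.List.pyGetD ws (i - 1) "") then
            corrections ++ [(i, "Repeated word: " ++ PySem.List.pyGetD ws i "")]
          else corrections
        if PySem.Str.lower (PySem.List.pyGetD ws i "") = "a" ∧ i < (ws.length : Int) - 1 then
          if pvFirstVowel (PySem.List.pyGetD ws (i + 1) "") = true then
            corrections ++ [(i, "'a' should be 'an' before '" ++ PySem.List.pyGetD ws (i + 1) "" ++ "'")]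
          else corrections
        else corrections) acc
    = acc ++ l.flatMap (fun i => repAt ws i ++ artAt ws i) := by
  intro l
  induction l with
  | nil => simp
  | cons i l ih =>
    intro acc
    simp only [List.foldl_cons, List.flatMap_cons, ih]
    unfold repAt artAt
    split_ifs with h1 h2 h3 h2 h3 <;> simp_all

-- B's repeats loop, as a flatMap
lemma foldlRep (ws : List String) : ∀ (l : List Int), (∀ i ∈ l, 0 < i) → ∀ (acc : List (Int × String)),
    l.foldl
      (fun acc i =>
        if PySem.Str.lower (PySem.List.pyGetD ws i "") = PySem.Str.lower (PySem.List.pyGetD ws (i - 1) "") then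
          acc ++ [(i, "Repeated word: " ++ PySem.List.pyGetD ws i "")]
        else acc) acc
    = acc ++ l.flatMap (repAt ws) := by
  intro l
  induction l with
  | nil => simp
  | cons i l ih =>
    intro hpos acc
    have hi : 0 < i := hpos i (by simp)
    simp only [List.foldl_cons, List.flatMap_cons, ih (fun j hj => hpos j (by simp [hj]))]
    unfold repAt
    split_ifs with h <;> simp_all

-- B's articles loop, as a flatMap
lemma foldlArt (ws : List String) : ∀ (l : List Int), (∀ i ∈ l, i < (ws.length : Int) - 1) → ∀ (acc : List (Int × String)),
    l.foldl
      (fun acc i =>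
        if PySem.Str.lower (PySem.List.pyGetD ws i "") = "a" ∧ pvFirstVowel (PySem.List.pyGetD ws (i + 1) "") = true then
          acc ++ [(i, "'a' should be 'an' before '" ++ PySem.List.pyGetD ws (i + 1) "" ++ "'")]
        else acc) acc
    = acc ++ l.flatMap (artAt ws) := by
  intro l
  induction l with
  | nil => simp
  | cons i l ih =>
    intro hlt acc
    have hi : i < (ws.length : Int) - 1 := hlt i (by simp)
    simp only [List.foldl_cons, List.flatMap_cons, ih (fun j hj => hlt j (by simp [hj]))]
    unfold artAt
    split_ifs with h h' <;> simp_all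

lemma rep_ext (ws : List String) :
    (PySem.List.pyRange 0 (ws.length : Int) 1).flatMap (repAt ws)
      = (PySem.List.pyRange 1 (ws.length : Int) 1).flatMap (repAt ws) := by
  by_cases h : (0 : Int) < (ws.length : Int)
  · rw [PySem.List.pyRange_one_cons h]
    simp [repAt]
  · rw [PySem.List.pyRange_one_eq_nil (by omega), PySem.List.pyRange_one_eq_nil (by omega)]

lemma art_ext (ws : List String) :
    (PySem.List.pyRange 0 (ws.length : Int) 1).flatMap (artAt ws)
      = (PySem.List.pyRange 0 ((ws.length : Int) - 1) 1).flatMap (artAt ws) := by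
  by_cases h : (0 : Int) < (ws.length : Int)
  · rw [PySem.List.pyRange_one_append 0 ((ws.length : Int) - 1) (ws.length : Int) (by omega) (by omega)]
    have : PySem.List.pyRange ((ws.length : Int) - 1) (ws.length : Int) 1 = [(ws.length : Int) - 1] := by
      have := PySem.List.pyRange_one_singleton ((ws.length : Int) - 1)
      simpa using this
    rw [this]
    simp [artAt]
  · rw [PySem.List.pyRange_one_eq_nil (by omega), PySem.List.pyRange_one_eq_nil (by omega)]

-- the whole equivalence, over an arbitrary word list
lemma main_eq (ws : List String) :
    (PySem.List.enumerate ws).foldl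
      (fun corrections iw =>
        let corrections :=
          if 0 < iw.1 ∧ PySem.Str.lower iw.2 = PySem.Str.lower (PySem.List.pyGetD ws (iw.1 - 1) "") then
            corrections ++ [(iw.1, "Repeated word: " ++ iw.2)]
          else corrections
        if PySem.Str.lower iw.2 = "a" ∧ iw.1 < (ws.length : Int) - 1 then
          if pvFirstVowel (PySem.List.pyGetD ws (iw.1 + 1) "") = true then
            corrections ++ [(iw.1, "'a' should be 'an' before '" ++ PySem.List.pyGetD ws (iw.1 + 1) "" ++ "'")]
          else corrections
        else corrections) []
    = pvMerge
        ((PySem.List.pyRange 1 (ws.length : Int) 1).foldl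
          (fun acc i =>
            if PySem.Str.lower (PySem.List.pyGetD ws i "") = PySem.Str.lower (PySem.List.pyGetD ws (i - 1) "") then
              acc ++ [(i, "Repeated word: " ++ PySem.List.pyGetD ws i "")]
            else acc) [])
        ((PySem.List.pyRange 0 ((ws.length : Int) - 1) 1).foldl
          (fun acc i =>
            if PySem.Str.lower (PySem.List.pyGetD ws i "") = "a" ∧ pvFirstVowel (PySem.List.pyGetD ws (i + 1) "") = true then
              acc ++ [(i, "'a' should be 'an' before '" ++ PySem.List.pyGetD ws (i + 1) "" ++ "'")]
            else acc) []) := by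
  rw [PySem.List.enumerate_eq_map_pyRange ws "", List.foldl_map]
  rw [foldlA ws]
  rw [foldlRep ws (PySem.List.pyRange 1 (ws.length : Int) 1)
    (fun i hi => by have := (PySem.List.mem_pyRange_one.mp hi).1; omega)]
  rw [foldlArt ws (PySem.List.pyRange 0 ((ws.length : Int) - 1) 1)
    (fun i hi => by have := (PySem.List.mem_pyRange_one.mp hi).2; omega)]
  simp only [List.nil_append]
  rw [← rep_ext, ← art_ext]
  exact (merge_flat ws (ws.length : Int) ((ws.length : Int) - 0).toNat 0 rfl).symm

-- ===== VERDICT (by name: the statement is the Claim_ definition above) =====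
theorem check_grammar_spec : Claim_equal_check_grammar :=
  fun sentence _ => main_eq (PySem.Str.split₀ sentence)
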